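-- pv_equiv track=rewrite | github.com/mialydefelice/exp_analysis | plate_reader/functions/data_handling.py | find_data_stops
-- ===== SOURCE A (Python) =====
-- def find_data_stops(data_starts, data_breaks):
--     """
--     Takes in all the data start sites, and all the potential
--     places where the data would stop, and finds the next empty
--     list after a data start site, to define that data's stop
--     site.
--     """
--     data_stop = []
--     for start in data_starts:
--          for brea in data_breaks:
--             if brea > start:
--                 data_stop.append(brea)
--                 break
--     return data_stop
-- ===== SOURCE B (Python) =====
-- def find_data_stops(data_starts, data_breaks):
--     # Prefix-maxima "records" of data_breaks: the first break greater than any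
--     # start is always one of these, and they are strictly increasing, so a
--     # binary search per start replaces A's inner linear scan.
--     records = []
--     for b in data_breaks:
--         if not records or b > records[-1]:
--             records.append(b)
--     data_stop = []
--     for start in data_starts:
--         lo, hi = 0, len(records)
--         while lo < hi:
--             mid = (lo + hi) // 2
--             if start < records[mid]:
--                 hi = mid
--             else:
--                 lo = mid + 1
--         if lo < len(records):
--             data_stop.append(records[lo])
--     return data_stop
-- ===== Notes on version B (the rewrite author's own statement) =====
-- stated objective: faster
-- what changed: B precomputes the strictly increasing list of prefix maxima of data_breaks once and answers each start by binary search on it, instead of A's linear scan of data_breaks per start.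
import Mathlib
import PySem

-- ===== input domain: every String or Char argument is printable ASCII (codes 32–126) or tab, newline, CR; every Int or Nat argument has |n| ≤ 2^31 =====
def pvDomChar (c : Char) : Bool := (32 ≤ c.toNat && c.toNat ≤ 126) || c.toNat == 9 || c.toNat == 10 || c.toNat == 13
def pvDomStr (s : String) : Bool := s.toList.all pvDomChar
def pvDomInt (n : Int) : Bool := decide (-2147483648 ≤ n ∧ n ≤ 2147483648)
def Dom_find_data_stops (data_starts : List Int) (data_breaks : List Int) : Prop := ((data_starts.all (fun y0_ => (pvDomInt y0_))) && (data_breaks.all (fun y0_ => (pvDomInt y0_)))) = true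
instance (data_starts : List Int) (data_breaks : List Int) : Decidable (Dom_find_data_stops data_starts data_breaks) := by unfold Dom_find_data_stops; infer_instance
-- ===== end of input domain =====

-- B replaces A's per-start linear scan of data_breaks by one precomputed
-- strictly increasing prefix-maxima list queried by binary search (objective: faster).

-- ===== PORT A =====
-- inner 'for brea in data_breaks: if brea > start: append; break' = first break > start
def firstBreak (start : Int) : List Int → Option Int
  | [] => none
  | b :: bs => if start < b then some b else firstBreak start bs

def find_data_stops (data_starts : List Int) (data_breaks : List Int) : List Int :=
  data_starts.foldl (fun data_stop start =>
    match firstBreak start data_breaks with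
    | some b => data_stop ++ [b]
    | none => data_stop) []

-- ===== PORT B =====
-- records: b appended iff records empty or b > records[-1]
def buildRecords (data_breaks : List Int) : List Int :=
  data_breaks.foldl (fun recs b =>
    if recs.isEmpty || decide (recs.getLast! < b) then recs ++ [b] else recs) []

-- the while lo < hi loop; fuel only makes it total (hi - lo shrinks each step)
def bisectGo (recs : List Int) (s : Int) (fuel lo hi : Nat) : Nat :=
  match fuel with
  | 0 => lo
  | f + 1 =>
    if lo < hi then
      let mid := (lo + hi) / 2
      if s < recs.getD mid 0 then bisectGo recs s f lo mid
      else bisectGo recs s f (mid + 1) hi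
    else lo

def find_data_stops_alt (data_starts : List Int) (data_breaks : List Int) : List Int :=
  let recs := buildRecords data_breaks
  data_starts.foldl (fun data_stop start =>
    let lo := bisectGo recs start recs.length 0 recs.length
    if lo < recs.length then data_stop ++ [recs.getD lo 0] else data_stop) []

-- ===== PRECONDITION & SPEC =====
def Spec_find_data_stops (data_starts : List Int) (data_breaks : List Int) (out : List Int) : Prop := out = find_data_stops_alt data_starts data_breaks
instance (data_starts : List Int) (data_breaks : List Int) (out : List Int) : Decidable (Spec_find_data_stops data_starts data_breaks out) := by unfold Spec_find_data_stops; infer_instance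

-- ===== CLAIM (what is proved, stated in full; the proofs are below) =====
def Claim_equal_find_data_stops : Prop := ∀ (data_starts : List Int) (data_breaks : List Int), Dom_find_data_stops data_starts data_breaks → Spec_find_data_stops data_starts data_breaks (find_data_stops data_starts data_breaks)

-- ===== LEMMAS AND PROOFS =====

-- recursive characterisation of buildRecords
def recordsFrom (m : Int) : List Int → List Int
  | [] => []
  | b :: bs => if m < b then b :: recordsFrom b bs else recordsFrom m bs

def recordsOf : List Int → List Int
  | [] => []
  | b :: bs => b :: recordsFrom b bs

theorem foldl_records (xs acc : List Int) (m : Int) (hne : acc ≠ []) (hl : acc.getLast! = m) :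
    xs.foldl (fun recs b =>
      if recs.isEmpty || decide (recs.getLast! < b) then recs ++ [b] else recs) acc
      = acc ++ recordsFrom m xs := by
  induction xs generalizing acc m with
  | nil => simp [recordsFrom]
  | cons b bs ih =>
    simp only [List.foldl, recordsFrom]
    have hie : acc.isEmpty = false := by simpa [List.isEmpty_iff] using hne
    rw [hie, hl]
    by_cases h : m < b
    · simp only [h, decide_true, Bool.false_or, if_true]
      rw [ih (acc ++ [b]) b (by simp) (by simp)]
      simp
    · simp only [h, decide_false, Bool.false_or, if_false]
      exact ih acc m hne hl

theorem buildRecords_eq (xs : List Int) : buildRecords xs = recordsOf xs := by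
  cases xs with
  | nil => rfl
  | cons b bs =>
    show List.foldl _ [] (b :: bs) = _
    simp only [List.foldl, List.isEmpty_nil, Bool.true_or, if_true, List.nil_append]
    exact foldl_records bs [b] b (by simp) (by simp)

theorem firstBreak_recordsFrom (s m : Int) (xs : List Int) (h : m ≤ s) :
    firstBreak s xs = firstBreak s (recordsFrom m xs) := by
  induction xs generalizing m with
  | nil => rfl
  | cons b bs ih =>
    by_cases hmb : m < b
    · simp only [recordsFrom, hmb, if_true]
      by_cases hsb : s < b
      · simp [firstBreak, hsb]
      · simp only [firstBreak, hsb, if_false]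
        exact ih b (by omega)
    · have hsb : ¬ s < b := by omega
      simp only [recordsFrom, hmb, if_false, firstBreak, hsb, if_false]
      exact ih m h

theorem firstBreak_recordsOf (s : Int) (xs : List Int) :
    firstBreak s xs = firstBreak s (recordsOf xs) := by
  cases xs with
  | nil => rfl
  | cons b bs =>
    by_cases hsb : s < b
    · simp [firstBreak, recordsOf, hsb]
    · simp only [firstBreak, recordsOf, hsb, if_false]
      exact firstBreak_recordsFrom s b bs (by omega)

theorem recordsFrom_gt (m : Int) (xs : List Int) : ∀ y ∈ recordsFrom m xs, m < y := by
  induction xs generalizing m with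
  | nil => simp [recordsFrom]
  | cons b bs ih =>
    by_cases h : m < b
    · simp only [recordsFrom, h, if_true]
      intro y hy
      rcases List.mem_cons.mp hy with rfl | hy
      · exact h
      · exact lt_trans h (ih b y hy)
    · simp only [recordsFrom, h, if_false]
      exact ih m

theorem recordsFrom_sorted (m : Int) (xs : List Int) : (recordsFrom m xs).Pairwise (· < ·) := by
  induction xs generalizing m with
  | nil => simp [recordsFrom]
  | cons b bs ih =>
    by_cases h : m < b
    · simp only [recordsFrom, h, if_true]
      exact List.pairwise_cons.mpr ⟨recordsFrom_gt b bs, ih b⟩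
    · simp only [recordsFrom, h, if_false]; exact ih m

theorem recordsOf_sorted (xs : List Int) : (recordsOf xs).Pairwise (· < ·) := by
  cases xs with
  | nil => simp [recordsOf]
  | cons b bs =>
    exact List.pairwise_cons.mpr ⟨recordsFrom_gt b bs, recordsFrom_sorted b bs⟩

theorem sorted_getD_mono {recs : List Int} (hs : recs.Pairwise (· < ·))
    {i j : Nat} (hij : i ≤ j) (hj : j < recs.length) :
    recs.getD i 0 ≤ recs.getD j 0 := by
  rcases Nat.lt_or_ge i j with h | h
  · have := (List.pairwise_iff_getElem.mp hs) i j (by omega) hj h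
    rw [List.getD_eq_getElem recs 0 (by omega), List.getD_eq_getElem recs 0 hj]
    omega
  · have : i = j := by omega
    subst this; rfl

theorem bisectGo_correct (recs : List Int) (s : Int)
    (hmono : ∀ i j : Nat, i ≤ j → j < recs.length → recs.getD i 0 ≤ recs.getD j 0) :
    ∀ (fuel lo hi : Nat), hi ≤ recs.length → hi - lo ≤ fuel →
    (∀ i, i < lo → recs.getD i 0 ≤ s) →
    (∀ i, hi ≤ i → i < recs.length → s < recs.getD i 0) →
    (∀ i, i < bisectGo recs s fuel lo hi → recs.getD i 0 ≤ s) ∧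
    (bisectGo recs s fuel lo hi < recs.length → s < recs.getD (bisectGo recs s fuel lo hi) 0) := by
  intro fuel
  induction fuel with
  | zero =>
    intro lo hi hhi hfuel hlow hhigh
    simp only [bisectGo]
    exact ⟨hlow, fun h => hhigh lo (by omega) h⟩
  | succ f ih =>
    intro lo hi hhi hfuel hlow hhigh
    by_cases hlt : lo < hi
    · simp only [bisectGo, hlt, if_true]
      by_cases hmid : s < recs.getD ((lo + hi) / 2) 0
      · simp only [hmid, if_true]
        exact ih lo ((lo + hi) / 2) (by omega) (by omega) hlow
          (fun i hi1 hi2 => lt_of_lt_of_le hmid (hmono _ i hi1 hi2))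
      · simp only [hmid, if_false]
        refine ih ((lo + hi) / 2 + 1) hi hhi (by omega) ?_ hhigh
        intro i hi1
        exact le_trans (hmono i ((lo + hi) / 2) (by omega) (by omega)) (by omega)
    · simp only [bisectGo, hlt, if_false]
      exact ⟨hlow, fun h => hhigh lo (by omega) h⟩

theorem firstBreak_of_index (s : Int) (recs : List Int) (r : Nat)
    (hlow : ∀ i, i < r → recs.getD i 0 ≤ s)
    (hr : r < recs.length → s < recs.getD r 0) :
    firstBreak s recs = if r < recs.length then some (recs.getD r 0) else none := by
  induction recs generalizing r with
  | nil => simp [firstBreak]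
  | cons b bs ih =>
    cases r with
    | zero =>
      have : s < b := by simpa using hr (by simp)
      simp [firstBreak, this]
    | succ k =>
      have hb : b ≤ s := by simpa using hlow 0 (by omega)
      have hsb : ¬ s < b := by omega
      simp only [firstBreak, hsb, if_false]
      rw [ih k (fun i hik => by simpa using hlow (i + 1) (by omega))
        (fun hk => by simpa using hr (by simpa using Nat.succ_lt_succ hk))]
      simp

theorem step_eq (data_breaks : List Int) (data_stop : List Int) (start : Int) :
    (match firstBreak start data_breaks with
      | some b => data_stop ++ [b]
      | none => data_stop) =
    (let recs := buildRecords data_breaks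
     let lo := bisectGo recs start recs.length 0 recs.length
     if lo < recs.length then data_stop ++ [recs.getD lo 0] else data_stop) := by
  have hb := buildRecords_eq data_breaks
  set recs := buildRecords data_breaks with hrecs
  have hsorted : recs.Pairwise (· < ·) := by rw [hb]; exact recordsOf_sorted data_breaks
  have hmono : ∀ i j : Nat, i ≤ j → j < recs.length → recs.getD i 0 ≤ recs.getD j 0 :=
    fun _ _ hij hj => sorted_getD_mono hsorted hij hj
  have hcorr := bisectGo_correct recs start hmono recs.length 0 recs.length
    (le_refl _) (by omega) (by omega) (by omega)
  have h1 : firstBreak start data_breaks = firstBreak start recs := by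
    rw [hb]; exact firstBreak_recordsOf start data_breaks
  rw [h1, firstBreak_of_index start recs _ hcorr.1 hcorr.2]
  by_cases h : bisectGo recs start recs.length 0 recs.length < recs.length <;> simp [h]

-- ===== VERDICT (by name: the statement is the Claim_ definition above) =====
theorem find_data_stops_spec : Claim_equal_find_data_stops := by
  intro data_starts data_breaks _
  unfold Spec_find_data_stops find_data_stops find_data_stops_alt
  congr 1
  funext data_stop start
  exact step_eq data_breaks data_stop start
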